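-- pv_equiv track=rewrite | github.com/mindedal/advent-of-code | 2025/04/main.py | part2
-- ===== SOURCE A (Python) =====
-- from collections import deque
--
-- def part2(grid: list[str]) -> int:
--     """Return total rolls removable via repeated accessibility.
--
--     Iteratively remove any roll with < 4 neighbouring rolls; each removal can
--     unlock more accessible rolls. Uses a neighbour-count queue to avoid
--     rescanning the whole grid each round.
--     """
--
--     if not grid:
--         return 0
--
--     h = len(grid)
--     w = len(grid[0])
--     chars = [list(row) for row in grid]
--
--     counts = [[0] * w for _ in range(h)]
--     for r in range(h):
--         for c in range(w):
--             if chars[r][c] != "@":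
--                 continue
--             for dr in (-1, 0, 1):
--                 for dc in (-1, 0, 1):
--                     if dr == 0 and dc == 0:
--                         continue
--                     nr, nc = r + dr, c + dc
--                     if 0 <= nr < h and 0 <= nc < w and chars[nr][nc] == "@":
--                         counts[r][c] += 1
--
--     queue: deque[tuple[int, int]] = deque()
--     for r in range(h):
--         for c in range(w):
--             if chars[r][c] == "@" and counts[r][c] < 4:
--                 queue.append((r, c))
--
--     removed = 0
--     while queue:
--         r, c = queue.popleft()
--         if chars[r][c] != "@":
--             continue  # already removed earlier
--         if counts[r][c] >= 4:
--             continue  # no longer accessible after prior updates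
--
--         chars[r][c] = "."
--         removed += 1
--
--         for dr in (-1, 0, 1):
--             for dc in (-1, 0, 1):
--                 if dr == 0 and dc == 0:
--                     continue
--                 nr, nc = r + dr, c + dc
--                 if 0 <= nr < h and 0 <= nc < w and chars[nr][nc] == "@":
--                     counts[nr][nc] -= 1
--                     if counts[nr][nc] < 4:
--                         queue.append((nr, nc))
--
--     return removed
-- ===== SOURCE B (Python) =====
-- def part2(grid: list[str]) -> int:
--     """Same result as A: repeated whole-grid sweeps instead of a neighbour-count queue."""
--     if not grid:
--         return 0
--     h = len(grid)
--     w = len(grid[0])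
--     g = [list(row) for row in grid]
--
--     def live_nbrs(r, c):
--         n = 0
--         for dr in (-1, 0, 1):
--             for dc in (-1, 0, 1):
--                 if dr == 0 and dc == 0:
--                     continue
--                 nr, nc = r + dr, c + dc
--                 if 0 <= nr < h and 0 <= nc < w and g[nr][nc] == "@":
--                     n += 1
--         return n
--
--     removed = 0
--     while True:
--         batch = [(r, c) for r in range(h) for c in range(w)
--                  if g[r][c] == "@" and live_nbrs(r, c) < 4]
--         if not batch:
--             break
--         for r, c in batch:
--             g[r][c] = "."
--         removed += len(batch)
--     return removed
-- ===== Notes on version B (the rewrite author's own statement) =====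
-- stated objective: simpler
-- what changed: A's deque of candidate cells with incrementally maintained neighbour counts is replaced by repeated whole-grid sweeps that recount live neighbours from scratch, blank every accessible roll of the pass at once, and stop when a pass removes nothing; both reach the same unique fixpoint (the 4-core).
import Mathlib
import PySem

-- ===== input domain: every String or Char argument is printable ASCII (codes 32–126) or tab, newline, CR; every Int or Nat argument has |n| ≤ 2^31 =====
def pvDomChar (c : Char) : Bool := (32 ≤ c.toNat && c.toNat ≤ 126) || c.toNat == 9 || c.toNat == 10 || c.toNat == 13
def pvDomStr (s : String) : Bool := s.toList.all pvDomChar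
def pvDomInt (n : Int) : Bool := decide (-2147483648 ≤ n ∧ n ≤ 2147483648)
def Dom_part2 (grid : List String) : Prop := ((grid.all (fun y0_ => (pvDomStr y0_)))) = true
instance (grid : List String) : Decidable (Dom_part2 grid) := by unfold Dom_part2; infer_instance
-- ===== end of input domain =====

-- B replaces A's neighbour-count deque by repeated whole-grid sweeps to the same fixpoint (objective: simpler); the return value is compared (neither function mutates its argument).

-- ===== PORT A =====

-- the 8 neighbour offsets, in Python's dr/dc double-loop order ((0,0) skipped by `continue`)
def pvDirs : List (Int × Int) := [(-1,-1),(-1,0),(-1,1),(0,-1),(0,1),(1,-1),(1,0),(1,1)]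

-- chars[r][c]; every read in both Pythons is bounds-checked (inside Pre_), the default is never '@'
def cget (chars : List (List Char)) (p : ℕ × ℕ) : Char := (chars.getD p.1 []).getD p.2 ' '

-- chars[r][c] = ch
def cset (chars : List (List Char)) (p : ℕ × ℕ) (ch : Char) : List (List Char) :=
  chars.set p.1 ((chars.getD p.1 []).set p.2 ch)

-- `nr, nc = r+dr, c+dc` together with the `0 <= nr < h and 0 <= nc < w` bounds check
def shiftIn (h w : ℕ) (p : ℕ × ℕ) (d : Int × Int) : Option (ℕ × ℕ) :=
  let nr : Int := (p.1 : Int) + d.1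
  let nc : Int := (p.2 : Int) + d.2
  if 0 ≤ nr ∧ nr < (h : Int) ∧ 0 ≤ nc ∧ nc < (w : Int) then some (nr.toNat, nc.toNat) else none

-- the inner dr/dc double loop counting '@' neighbours (shared syntactically by both Pythons)
def countNbrs (h w : ℕ) (chars : List (List Char)) (p : ℕ × ℕ) : ℕ :=
  (pvDirs.filter (fun d => ((shiftIn h w p d).map (fun n => cget chars n == '@')).getD false)).length

def mget (m : List (List Int)) (p : ℕ × ℕ) : Int := (m.getD p.1 []).getD p.2 0

-- counts[r][c] -= 1
def mdec (m : List (List Int)) (p : ℕ × ℕ) : List (List Int) :=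
  m.set p.1 ((m.getD p.1 []).set p.2 (mget m p - 1))

-- number of '@' in the whole matrix: the termination measure of both loops
def liveTotal (chars : List (List Char)) : ℕ := (chars.map (fun row => row.count '@')).sum

theorem count_set_lt (row : List Char) (c : ℕ) (hc : row.getD c ' ' = '@') :
    (row.set c '.').count '@' < row.count '@' := by
  induction row generalizing c with
  | nil => simp [List.getD] at hc
  | cons x xs ih =>
    cases c with
    | zero =>
      simp [List.getD] at hc
      simp [hc, List.count_cons]
    | succ c =>
      simp [List.getD] at hc
      have := ih c hc
      by_cases hx : x = '@' <;> simp [List.count_cons, hx] <;> omega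

theorem cget_cons_succ (row : List Char) (rows : List (List Char)) (r c : ℕ) :
    cget (row :: rows) (r + 1, c) = cget rows (r, c) := by
  simp [cget]

theorem cset_cons_succ (row : List Char) (rows : List (List Char)) (r c : ℕ) (ch : Char) :
    cset (row :: rows) (r + 1, c) ch = row :: cset rows (r, c) ch := by
  simp [cset]

theorem liveTotal_cons (row : List Char) (rows : List (List Char)) :
    liveTotal (row :: rows) = row.count '@' + liveTotal rows := by
  simp [liveTotal]

theorem liveTotal_cset_lt (chars : List (List Char)) (p : ℕ × ℕ) (hp : cget chars p = '@') :
    liveTotal (cset chars p '.') < liveTotal chars := by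
  induction chars generalizing p with
  | nil => simp [cget, List.getD] at hp
  | cons row rows ih =>
    rcases p with ⟨r, c⟩
    cases r with
    | zero =>
      have h2 : row.getD c ' ' = '@' := by simpa [cget] using hp
      have hset : cset (row :: rows) (0, c) '.' = row.set c '.' :: rows := by simp [cset]
      rw [hset, liveTotal_cons, liveTotal_cons]
      have := count_set_lt row c h2
      omega
    | succ r =>
      rw [cget_cons_succ] at hp
      rw [cset_cons_succ, liveTotal_cons, liveTotal_cons]
      have := ih (r, c) hp
      omega

theorem count_set_le (row : List Char) (c : ℕ) :
    (row.set c '.').count '@' ≤ row.count '@' := by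
  induction row generalizing c with
  | nil => simp
  | cons x xs ih =>
    cases c with
    | zero => by_cases hx : x = '@' <;> simp [hx]
    | succ c =>
      have := ih c
      by_cases hx : x = '@' <;> simp [hx] <;> omega

theorem liveTotal_cset_le (chars : List (List Char)) (p : ℕ × ℕ) :
    liveTotal (cset chars p '.') ≤ liveTotal chars := by
  induction chars generalizing p with
  | nil => simp [cset, liveTotal]
  | cons row rows ih =>
    rcases p with ⟨r, c⟩
    cases r with
    | zero =>
      have hset : cset (row :: rows) (0, c) '.' = row.set c '.' :: rows := by simp [cset]
      rw [hset, liveTotal_cons, liveTotal_cons]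
      have := count_set_le row c
      omega
    | succ r =>
      rw [cset_cons_succ, liveTotal_cons, liveTotal_cons]
      have := ih (r, c)
      omega

-- one step of the `for dr / for dc` update loop after a removal
def stepDirs (h w : ℕ) (chars' : List (List Char)) (p : ℕ × ℕ)
    (st : List (List Int) × List (ℕ × ℕ)) (d : Int × Int) : List (List Int) × List (ℕ × ℕ) :=
  match shiftIn h w p d with
  | none => st
  | some n =>
    if cget chars' n = '@' then
      let cnts := mdec st.1 n
      (cnts, if mget cnts n < 4 then st.2 ++ [n] else st.2)
    else st

-- the `while queue:` loop
def loopA (h w : ℕ) (chars : List (List Char)) (counts : List (List Int))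
    (queue : List (ℕ × ℕ)) (removed : Int) : Int :=
  match queue with
  | [] => removed
  | p :: rest =>
    if cget chars p ≠ '@' then loopA h w chars counts rest removed
    else if 4 ≤ mget counts p then loopA h w chars counts rest removed
    else
      let chars' := cset chars p '.'
      let st := pvDirs.foldl (stepDirs h w chars' p) (counts, rest)
      loopA h w chars' st.1 st.2 (removed + 1)
termination_by (liveTotal chars, queue.length)
decreasing_by
  · exact Prod.Lex.right _ (by simp)
  · exact Prod.Lex.right _ (by simp)
  · exact Prod.Lex.left _ _ (liveTotal_cset_lt chars p (by simpa using ‹¬cget chars p ≠ '@'›))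

def part2 (grid : List String) : Int :=
  if grid = [] then 0
  else
    let h := grid.length
    let w := (grid.headD "").length
    let chars := grid.map String.toList
    let counts : List (List Int) :=
      (List.range h).map (fun r => (List.range w).map (fun c =>
        if cget chars (r, c) = '@' then (countNbrs h w chars (r, c) : Int) else 0))
    let queue : List (ℕ × ℕ) :=
      (List.range h).flatMap (fun r =>
        ((List.range w).filter (fun c =>
          cget chars (r, c) == '@' && decide (mget counts (r, c) < 4))).map (fun c => (r, c)))
    loopA h w chars counts queue 0

-- ===== PORT B =====

-- the batch comprehension: all accessible rolls of the current grid, row-major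
def sweepB (h w : ℕ) (chars : List (List Char)) : List (ℕ × ℕ) :=
  (List.range h).flatMap (fun r =>
    ((List.range w).filter (fun c =>
      cget chars (r, c) == '@' && decide (countNbrs h w chars (r, c) < 4))).map (fun c => (r, c)))

-- `for r, c in batch: g[r][c] = "."`
def blank (chars : List (List Char)) (l : List (ℕ × ℕ)) : List (List Char) :=
  l.foldl (fun g p => cset g p '.') chars

theorem mem_sweepB_at (h w : ℕ) (chars : List (List Char)) (p : ℕ × ℕ)
    (hp : p ∈ sweepB h w chars) : cget chars p = '@' := by
  unfold sweepB at hp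
  simp only [List.mem_flatMap, List.mem_map, List.mem_filter, List.mem_range,
    Bool.and_eq_true, beq_iff_eq, decide_eq_true_eq] at hp
  obtain ⟨r, _, c, ⟨_, hc, _⟩, rfl⟩ := hp
  exact hc

theorem liveTotal_blank_le (l : List (ℕ × ℕ)) (chars : List (List Char)) :
    liveTotal (blank chars l) ≤ liveTotal chars := by
  induction l generalizing chars with
  | nil => simp [blank]
  | cons p tl ih =>
    calc liveTotal (blank (cset chars p '.') tl) ≤ liveTotal (cset chars p '.') := ih _
      _ ≤ liveTotal chars := liveTotal_cset_le chars p

-- the `while True:` loop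
def loopB (h w : ℕ) (chars : List (List Char)) (removed : Int) : Int :=
  let batch := sweepB h w chars
  if hb : batch = [] then removed
  else loopB h w (blank chars batch) (removed + (batch.length : Int))
termination_by liveTotal chars
decreasing_by
  have hne : sweepB h w chars ≠ [] := hb
  rcases hq : sweepB h w chars with _ | ⟨p, tl⟩
  · exact absurd hq hne
  · have hp : cget chars p = '@' := mem_sweepB_at h w chars p (by rw [hq]; exact List.mem_cons_self)
    calc liveTotal (blank chars (p :: tl)) = liveTotal (blank (cset chars p '.') tl) := rfl
      _ ≤ liveTotal (cset chars p '.') := liveTotal_blank_le tl _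
      _ < liveTotal chars := liveTotal_cset_lt chars p hp
def part2_alt (grid : List String) : Int :=
  if grid = [] then 0
  else loopB grid.length (grid.headD "").length (grid.map String.toList) 0

-- ===== PRECONDITION & SPEC =====

-- Pre_ excludes exactly the inputs on which Python A raises IndexError: a row strictly shorter
-- than the first row (B raises there as well).
def Pre_part2 (grid : List String) : Prop := ∀ s ∈ grid, (grid.headD "").length ≤ s.length
instance (grid : List String) : Decidable (Pre_part2 grid) := by unfold Pre_part2; infer_instance

def pvWitness_part2 : List String := ["@@.", "@@@", ".@@"]

def Spec_part2 (grid : List String) (out : Int) : Prop := out = part2_alt grid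
instance (grid : List String) (out : Int) : Decidable (Spec_part2 grid out) := by
  unfold Spec_part2; infer_instance

-- ===== CLAIM (what is proved, stated in full; the proofs are below) =====
def Claim_equal_part2 : Prop :=
  ∀ (grid : List String), Dom_part2 grid → Pre_part2 grid → Spec_part2 grid (part2 grid)

-- ===== LEMMAS AND PROOFS =====


-- the h×w index box
def pvBox (h w : ℕ) : Finset (ℕ × ℕ) := Finset.range h ×ˢ Finset.range w

-- the set of live rolls of a grid state
def liveSet (h w : ℕ) (chars : List (List Char)) : Finset (ℕ × ℕ) :=
  (pvBox h w).filter (fun p => cget chars p = '@')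

-- the in-box neighbours of a cell, as Python's dr/dc loop produces them
def nbrList (h w : ℕ) (p : ℕ × ℕ) : List (ℕ × ℕ) := pvDirs.filterMap (shiftIn h w p)

-- number of live neighbours of p relative to an arbitrary set S
def deg (h w : ℕ) (S : Finset (ℕ × ℕ)) (p : ℕ × ℕ) : ℕ :=
  ((nbrList h w p).filter (fun n => decide (n ∈ S))).length

-- the 4-core: the largest subset of S0 in which every cell keeps ≥ 4 neighbours
def core (h w : ℕ) (S0 : Finset (ℕ × ℕ)) : Finset (ℕ × ℕ) :=
  (S0.powerset.filter (fun T => ∀ q ∈ T, 4 ≤ deg h w T q)).sup id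

def Mshape (m : List (List Int)) (h w : ℕ) : Prop :=
  m.length = h ∧ ∀ row ∈ m, row.length = w

def decAll (m : List (List Int)) (l : List (ℕ × ℕ)) : List (List Int) := l.foldl mdec m

-- cells actually decremented by the dr/dc update loop
def procD (h w : ℕ) (chars' : List (List Char)) (p : ℕ × ℕ) (D : List (Int × Int)) : List (ℕ × ℕ) :=
  (D.filterMap (shiftIn h w p)).filter (fun n => cget chars' n == '@')

theorem mem_box_iff (h w : ℕ) (p : ℕ × ℕ) : p ∈ pvBox h w ↔ p.1 < h ∧ p.2 < w := by
  simp [pvBox, Finset.mem_product]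

theorem shiftIn_box {h w : ℕ} {p n : ℕ × ℕ} {d : Int × Int}
    (hd : shiftIn h w p d = some n) : n ∈ pvBox h w := by
  rcases n with ⟨n1, n2⟩
  simp only [shiftIn, Option.ite_none_right_eq_some, Option.some.injEq, Prod.mk.injEq] at hd
  obtain ⟨⟨h1, h2, h3, h4⟩, e1, e2⟩ := hd
  rw [mem_box_iff]
  constructor <;> simp <;> omega

theorem mem_nbrList_box {h w : ℕ} {p n : ℕ × ℕ} (hn : n ∈ nbrList h w p) : n ∈ pvBox h w := by
  rw [nbrList, List.mem_filterMap] at hn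
  obtain ⟨d, _, hd⟩ := hn
  exact shiftIn_box hd

theorem shiftIn_inj {h w : ℕ} {p : ℕ × ℕ} {d d' : Int × Int} {n : ℕ × ℕ}
    (h1 : shiftIn h w p d = some n) (h2 : shiftIn h w p d' = some n) : d = d' := by
  rcases n with ⟨n1, n2⟩
  rcases d with ⟨a1, a2⟩
  rcases d' with ⟨b1, b2⟩
  simp only [shiftIn, Option.ite_none_right_eq_some, Option.some.injEq, Prod.mk.injEq] at h1 h2
  obtain ⟨⟨c1, c2, c3, c4⟩, e1, e2⟩ := h1
  obtain ⟨⟨f1, f2, f3, f4⟩, g1, g2⟩ := h2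
  simp only [Prod.mk.injEq]
  constructor <;> omega

theorem nodup_nbrList (h w : ℕ) (p : ℕ × ℕ) : (nbrList h w p).Nodup := by
  apply List.Nodup.filterMap
  · intro a a' b ha ha'
    exact shiftIn_inj (Option.mem_def.mp ha) (Option.mem_def.mp ha')
  · decide

theorem deg_mono {h w : ℕ} {S T : Finset (ℕ × ℕ)} (hST : S ⊆ T) (p : ℕ × ℕ) :
    deg h w S p ≤ deg h w T p := by
  apply List.Sublist.length_le
  apply List.monotone_filter_right
  intro a ha
  simp only [decide_eq_true_eq] at ha ⊢
  exact hST ha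

theorem length_filter_filterMap {α β : Type} (l : List α) (f : α → Option β) (P : β → Bool) :
    ((l.filterMap f).filter P).length = (l.filter (fun a => ((f a).map P).getD false)).length := by
  induction l with
  | nil => rfl
  | cons a tl ih =>
    cases hfa : f a with
    | none => simp [List.filterMap_cons, hfa, List.filter_cons, ih]
    | some b =>
      by_cases hb : P b <;>
        simp [List.filterMap_cons, hfa, List.filter_cons, hb, ih]

theorem countNbrs_eq_deg (h w : ℕ) (chars : List (List Char)) (p : ℕ × ℕ) :
    countNbrs h w chars p = deg h w (liveSet h w chars) p := by
  rw [countNbrs, deg, nbrList, length_filter_filterMap]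
  apply congrArg List.length
  apply List.filter_congr
  intro d hd
  cases hs : shiftIn h w p d with
  | none => rfl
  | some n =>
    have hnb : n ∈ pvBox h w := mem_nbrList_box (List.mem_filterMap.mpr ⟨d, hd, hs⟩)
    by_cases hc : cget chars n = '@' <;>
      simp [liveSet, Finset.mem_filter, hnb, hc]

theorem nbr_symm {h w : ℕ} {p q : ℕ × ℕ} (hq : q ∈ nbrList h w p) (hp : p ∈ pvBox h w) :
    p ∈ nbrList h w q := by
  rw [nbrList, List.mem_filterMap] at hq ⊢
  obtain ⟨⟨d1, d2⟩, hd, hs⟩ := hq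
  refine ⟨(-d1, -d2), ?_, ?_⟩
  · have hneg : ∀ x ∈ pvDirs, ((-(Prod.fst x), -(Prod.snd x)) : Int × Int) ∈ pvDirs := by decide
    exact hneg (d1, d2) hd
  · rw [mem_box_iff] at hp
    rcases p with ⟨p1, p2⟩
    rcases q with ⟨q1, q2⟩
    simp only [shiftIn, Option.ite_none_right_eq_some, Option.some.injEq, Prod.mk.injEq] at hs ⊢
    obtain ⟨⟨c1, c2, c3, c4⟩, e1, e2⟩ := hs
    obtain ⟨b1, b2⟩ := hp
    refine ⟨⟨by omega, by omega, by omega, by omega⟩, by omega, by omega⟩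

theorem length_filter_erase {β : Type} [BEq β] [LawfulBEq β] [DecidableEq β]
    (L : List β) (A : β → Bool) (p : β) :
    L.Nodup →
      (L.filter fun n => A n && !(n == p)).length
        = (L.filter A).length - (if p ∈ L ∧ A p = true then 1 else 0) := by
  induction L with
  | nil => simp
  | cons x xs ih =>
    intro hL
    obtain ⟨hx, hxs⟩ := List.nodup_cons.mp hL
    have ih' := ih hxs
    by_cases hxp : x = p
    · subst hxp
      have e1 : ((x :: xs).filter fun n => A n && !(n == x))
          = xs.filter fun n => A n && !(n == x) := by
        rw [List.filter_cons]
        simp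
      have h0 : ¬(x ∈ xs ∧ A x = true) := fun hc => hx hc.1
      rw [e1, ih', if_neg h0]
      by_cases hA : A x = true
      · have hpos : ((x :: xs).filter A) = x :: xs.filter A := by
          rw [List.filter_cons, if_pos hA]
        rw [hpos, if_pos ⟨List.mem_cons_self, hA⟩, List.length_cons]
        omega
      · have hneg : ((x :: xs).filter A) = xs.filter A := by
          rw [List.filter_cons, if_neg hA]
        rw [hneg, if_neg (fun hc => hA hc.2)]
    · have hbne : (x == p) = false := beq_eq_false_iff_ne.mpr hxp
      have hmemiff : (p ∈ x :: xs ∧ A p = true) ↔ (p ∈ xs ∧ A p = true) := by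
        constructor
        · rintro ⟨hm, hA2⟩
          rcases List.mem_cons.mp hm with rfl | hm
          · exact absurd rfl hxp
          · exact ⟨hm, hA2⟩
        · rintro ⟨hm, hA2⟩
          exact ⟨List.mem_cons_of_mem _ hm, hA2⟩
      have hxsA : p ∈ xs ∧ A p = true → 0 < (xs.filter A).length := fun hpm =>
        List.length_pos_iff.mpr (List.ne_nil_of_mem (List.mem_filter.mpr ⟨hpm.1, hpm.2⟩))
      by_cases hA : A x = true
      · have e1 : ((x :: xs).filter fun n => A n && !(n == p))
            = x :: (xs.filter fun n => A n && !(n == p)) := by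
          rw [List.filter_cons, hbne]
          simp [hA]
        have e2 : ((x :: xs).filter A) = x :: xs.filter A := by
          rw [List.filter_cons, if_pos hA]
        rw [e1, e2, List.length_cons, List.length_cons, ih']
        by_cases hpm : p ∈ xs ∧ A p = true
        · have := hxsA hpm
          rw [if_pos hpm, if_pos (hmemiff.mpr hpm)]
          omega
        · rw [if_neg hpm, if_neg (fun hc => hpm (hmemiff.mp hc))]
          omega
      · have e1 : ((x :: xs).filter fun n => A n && !(n == p))
            = xs.filter fun n => A n && !(n == p) := by
          rw [List.filter_cons, hbne]
          simp [hA]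
        have e2 : ((x :: xs).filter A) = xs.filter A := by
          rw [List.filter_cons, if_neg hA]
        rw [e1, e2, ih']
        by_cases hpm : p ∈ xs ∧ A p = true
        · rw [if_pos hpm, if_pos (hmemiff.mpr hpm)]
        · rw [if_neg hpm, if_neg (fun hc => hpm (hmemiff.mp hc))]

theorem deg_erase (h w : ℕ) (S : Finset (ℕ × ℕ)) (p q : ℕ × ℕ) :
    deg h w (S.erase p) q = deg h w S q - (if p ∈ nbrList h w q ∧ p ∈ S then 1 else 0) := by
  rw [deg, deg]
  have hcong : (nbrList h w q).filter (fun n => decide (n ∈ S.erase p))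
      = (nbrList h w q).filter (fun n => decide (n ∈ S) && !(n == p)) := by
    apply List.filter_congr
    intro n _
    by_cases h1 : n ∈ S <;> by_cases h2 : n = p <;> simp [Finset.mem_erase, h1, h2]
  rw [hcong,
    length_filter_erase (nbrList h w q) (fun n => decide (n ∈ S)) p (nodup_nbrList h w q)]
  congr 1
  simp

theorem deg_erase_of_mem {h w : ℕ} {S : Finset (ℕ × ℕ)} {p q : ℕ × ℕ}
    (h1 : p ∈ nbrList h w q) (h2 : p ∈ S) :
    deg h w (S.erase p) q + 1 = deg h w S q := by
  have hpos : 0 < deg h w S q := by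
    have : p ∈ (nbrList h w q).filter (fun n => decide (n ∈ S)) :=
      List.mem_filter.mpr ⟨h1, by simpa⟩
    exact List.length_pos_iff.mpr (List.ne_nil_of_mem this)
  rw [deg_erase, if_pos ⟨h1, h2⟩]
  omega

theorem deg_erase_of_not {h w : ℕ} {S : Finset (ℕ × ℕ)} {p q : ℕ × ℕ}
    (h1 : ¬(p ∈ nbrList h w q ∧ p ∈ S)) :
    deg h w (S.erase p) q = deg h w S q := by
  rw [deg_erase, if_neg h1]
  omega

theorem core_subset (h w : ℕ) (S0 : Finset (ℕ × ℕ)) : core h w S0 ⊆ S0 := by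
  intro p hp
  rw [core, Finset.mem_sup] at hp
  obtain ⟨T, hT, hpT⟩ := hp
  obtain ⟨hpow, _⟩ := Finset.mem_filter.mp hT
  exact Finset.mem_powerset.mp hpow hpT

theorem subset_core {h w : ℕ} {S0 T : Finset (ℕ × ℕ)} (hT : T ⊆ S0)
    (hcl : ∀ q ∈ T, 4 ≤ deg h w T q) : T ⊆ core h w S0 := by
  intro x hx
  rw [core, Finset.mem_sup]
  exact ⟨T, Finset.mem_filter.mpr ⟨Finset.mem_powerset.mpr hT, hcl⟩, hx⟩

theorem core_closed {h w : ℕ} {S0 : Finset (ℕ × ℕ)} {p : ℕ × ℕ} (hp : p ∈ core h w S0) :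
    4 ≤ deg h w (core h w S0) p := by
  rw [core, Finset.mem_sup] at hp
  obtain ⟨T, hTf, hpT⟩ := hp
  obtain ⟨hpow, hcl⟩ := Finset.mem_filter.mp hTf
  have hTc : T ⊆ core h w S0 := subset_core (Finset.mem_powerset.mp hpow) hcl
  exact le_trans (hcl p hpT) (deg_mono hTc p)

theorem not_core_of_removable {h w : ℕ} {S0 S : Finset (ℕ × ℕ)} {p : ℕ × ℕ}
    (hCS : core h w S0 ⊆ S) (hd : deg h w S p < 4) : p ∉ core h w S0 := by
  intro hp
  have := le_trans (core_closed hp) (deg_mono hCS p)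
  omega

theorem terminal_eq_core {h w : ℕ} {S0 S : Finset (ℕ × ℕ)} (hS : S ⊆ S0)
    (hCS : core h w S0 ⊆ S) (hcl : ∀ p ∈ S, 4 ≤ deg h w S p) : S = core h w S0 :=
  Finset.Subset.antisymm (subset_core hS hcl) hCS

theorem cget_at (chars : List (List Char)) (p : ℕ × ℕ) (hp : cget chars p = '@') :
    p.1 < chars.length ∧ p.2 < (chars.getD p.1 []).length := by
  have h1 : p.1 < chars.length := by
    by_contra hc
    have houter : chars.getD p.1 [] = [] := List.getD_eq_default _ _ (by omega)
    rw [cget, houter] at hp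
    exact absurd hp (by simp [List.getD])
  refine ⟨h1, ?_⟩
  by_contra hc
  have hinner : (chars.getD p.1 []).getD p.2 ' ' = ' ' := List.getD_eq_default _ _ (by omega)
  rw [cget] at hp
  rw [hinner] at hp
  exact absurd hp (by decide)

theorem getD_set_self {α : Type} (l : List α) {i : ℕ} (hi : i < l.length) (a d : α) :
    (l.set i a).getD i d = a := by
  rw [List.getD_eq_getElem?_getD, List.getElem?_set, if_pos rfl, if_pos hi]
  rfl

theorem getD_set_ne {α : Type} (l : List α) {i j : ℕ} (hij : i ≠ j) (a d : α) :
    (l.set i a).getD j d = l.getD j d := by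
  rw [List.getD_eq_getElem?_getD, List.getElem?_set, if_neg hij, ← List.getD_eq_getElem?_getD]

theorem cget_cset {chars : List (List Char)} {p : ℕ × ℕ} (hp : cget chars p = '@')
    (ch : Char) (q : ℕ × ℕ) :
    cget (cset chars p ch) q = if q = p then ch else cget chars q := by
  obtain ⟨h1, h2⟩ := cget_at chars p hp
  by_cases hq : q = p
  · subst hq
    rw [if_pos rfl, cget, cset, getD_set_self _ h1, getD_set_self _ h2]
  · rw [if_neg hq, cget, cset, cget]
    rcases p with ⟨r, c⟩
    rcases q with ⟨r', c'⟩
    by_cases hr : r = r'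
    · subst hr
      have hc' : c ≠ c' := fun hcc => hq (by simp [hcc])
      rw [getD_set_self _ h1, getD_set_ne _ hc']
    · rw [getD_set_ne _ hr]

theorem liveSet_cset {h w : ℕ} {chars : List (List Char)} {p : ℕ × ℕ}
    (hp : cget chars p = '@') :
    liveSet h w (cset chars p '.') = (liveSet h w chars).erase p := by
  ext q
  rw [liveSet, liveSet, Finset.mem_erase, Finset.mem_filter, Finset.mem_filter,
    cget_cset hp '.' q]
  by_cases hq : q = p
  · subst hq
    simp
  · simp only [if_neg hq, hq]
    tauto

theorem liveSet_blank {h w : ℕ} : ∀ (l : List (ℕ × ℕ)) (chars : List (List Char)),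
    l.Nodup → (∀ p ∈ l, p ∈ liveSet h w chars) →
    liveSet h w (blank chars l) = liveSet h w chars \ l.toFinset := by
  intro l
  induction l with
  | nil =>
    intro chars _ _
    simp [blank]
  | cons p tl ih =>
    intro chars hnd hmem
    obtain ⟨hp, htl⟩ := List.nodup_cons.mp hnd
    have hpl : p ∈ liveSet h w chars := hmem p List.mem_cons_self
    have hpc : cget chars p = '@' := (Finset.mem_filter.mp hpl).2
    have hstep : blank chars (p :: tl) = blank (cset chars p '.') tl := rfl
    have hmem' : ∀ q ∈ tl, q ∈ liveSet h w (cset chars p '.') := by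
      intro q hq
      rw [liveSet_cset hpc, Finset.mem_erase]
      exact ⟨fun hqp => hp (hqp ▸ hq), hmem q (List.mem_cons_of_mem _ hq)⟩
    rw [hstep, ih (cset chars p '.') htl hmem', liveSet_cset hpc]
    ext q
    simp only [Finset.mem_sdiff, Finset.mem_erase, List.toFinset_cons, Finset.mem_insert,
      List.mem_toFinset]
    tauto

theorem mget_at {m : List (List Int)} {h w : ℕ} (hm : Mshape m h w) {p : ℕ × ℕ}
    (hp : p ∈ pvBox h w) : p.1 < m.length ∧ p.2 < (m.getD p.1 []).length := by
  rw [mem_box_iff] at hp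
  obtain ⟨hl, hrow⟩ := hm
  have h1 : p.1 < m.length := by omega
  refine ⟨h1, ?_⟩
  have hmem : m.getD p.1 [] ∈ m := by
    rw [List.getD_eq_getElem?_getD, List.getElem?_eq_getElem h1]
    simpa using List.getElem_mem h1
  rw [hrow _ hmem]
  omega

theorem mget_mdec_self {m : List (List Int)} {h w : ℕ} (hm : Mshape m h w) {p : ℕ × ℕ}
    (hp : p ∈ pvBox h w) : mget (mdec m p) p = mget m p - 1 := by
  obtain ⟨h1, h2⟩ := mget_at hm hp
  rw [mdec]
  show ((m.set p.1 ((m.getD p.1 []).set p.2 (mget m p - 1))).getD p.1 []).getD p.2 0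
    = mget m p - 1
  rw [getD_set_self _ h1, getD_set_self _ h2]

theorem mget_mdec_ne {m : List (List Int)} {p q : ℕ × ℕ} (hne : q ≠ p) :
    mget (mdec m p) q = mget m q := by
  rcases p with ⟨r, c⟩
  rcases q with ⟨r', c'⟩
  simp only [mdec, mget]
  by_cases hr : r = r'
  · subst hr
    by_cases h1 : r < m.length
    · have hc : c ≠ c' := fun hcc => hne (by simp [hcc])
      rw [getD_set_self _ h1, getD_set_ne _ hc]
    · rw [List.set_eq_of_length_le (by omega)]
  · rw [getD_set_ne _ hr]

theorem mdec_shape {m : List (List Int)} {h w : ℕ} (hm : Mshape m h w) (p : ℕ × ℕ) :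
    Mshape (mdec m p) h w := by
  obtain ⟨hl, hrow⟩ := hm
  by_cases h1 : p.1 < m.length
  · constructor
    · simp [mdec, hl]
    · intro row hrowmem
      rw [mdec] at hrowmem
      have hgd : m.getD p.1 [] ∈ m := by
        rw [List.getD_eq_getElem?_getD, List.getElem?_eq_getElem h1]
        simpa using List.getElem_mem h1
      rcases List.mem_or_eq_of_mem_set hrowmem with hmem | rfl
      · exact hrow _ hmem
      · rw [List.length_set]
        exact hrow _ hgd
  · rw [mdec, List.set_eq_of_length_le (by omega)]
    exact ⟨hl, hrow⟩

theorem decAll_shape {h w : ℕ} : ∀ (l : List (ℕ × ℕ)) (m : List (List Int)),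
    Mshape m h w → Mshape (decAll m l) h w := by
  intro l
  induction l with
  | nil => intro m hm; exact hm
  | cons p tl ih => intro m hm; exact ih _ (mdec_shape hm p)

theorem mget_decAll {h w : ℕ} : ∀ (l : List (ℕ × ℕ)) (m : List (List Int)),
    Mshape m h w → l.Nodup → (∀ p ∈ l, p ∈ pvBox h w) → ∀ q,
    mget (decAll m l) q = mget m q - (if q ∈ l then 1 else 0) := by
  intro l
  induction l with
  | nil => intro m _ _ _ q; simp [decAll]
  | cons n tl ih =>
    intro m hm hnd hbox q
    obtain ⟨hn, htl⟩ := List.nodup_cons.mp hnd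
    have hstep : decAll m (n :: tl) = decAll (mdec m n) tl := rfl
    rw [hstep, ih (mdec m n) (mdec_shape hm n) htl
      (fun p hp => hbox p (List.mem_cons_of_mem _ hp)) q]
    by_cases hq : q = n
    · subst hq
      rw [mget_mdec_self hm (hbox q List.mem_cons_self)]
      simp [hn]
    · rw [mget_mdec_ne hq]
      simp [List.mem_cons, hq]

theorem mem_procD {h w : ℕ} {chars' : List (List Char)} {p n : ℕ × ℕ} :
    n ∈ procD h w chars' p pvDirs ↔ n ∈ nbrList h w p ∧ cget chars' n = '@' := by
  simp [procD, nbrList, List.mem_filter]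

theorem nodup_procD (h w : ℕ) (chars' : List (List Char)) (p : ℕ × ℕ) :
    (procD h w chars' p pvDirs).Nodup :=
  (nodup_nbrList h w p).filter _

theorem foldDirs_eq (h w : ℕ) (chars' : List (List Char)) (p : ℕ × ℕ) :
    ∀ (D : List (Int × Int)), (D.filterMap (shiftIn h w p)).Nodup →
      ∀ (m : List (List Int)), Mshape m h w → ∀ (q0 : List (ℕ × ℕ)),
      D.foldl (stepDirs h w chars' p) (m, q0)
        = (decAll m (procD h w chars' p D),
           q0 ++ (procD h w chars' p D).filter (fun n => decide (mget m n - 1 < 4))) := by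
  intro D
  induction D with
  | nil => intro _ m _ q0; simp [procD, decAll]
  | cons d ds ih =>
    intro hnd m hm q0
    rw [List.foldl_cons]
    cases hs : shiftIn h w p d with
    | none =>
      have hstep : stepDirs h w chars' p (m, q0) d = (m, q0) := by
        simp [stepDirs, hs]
      have hproc : procD h w chars' p (d :: ds) = procD h w chars' p ds := by
        rw [procD, procD, List.filterMap_cons, hs]
      rw [hstep, hproc]
      apply ih
      · rwa [List.filterMap_cons, hs] at hnd
      · exact hm
    | some n =>
      rw [List.filterMap_cons, hs] at hnd
      obtain ⟨hn_notin, hnd'⟩ := List.nodup_cons.mp hnd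
      have hnb : n ∈ pvBox h w := shiftIn_box hs
      by_cases hlv : cget chars' n = '@'
      · have hstep : stepDirs h w chars' p (m, q0) d
            = (mdec m n, if mget (mdec m n) n < 4 then q0 ++ [n] else q0) := by
          rw [stepDirs, hs]
          show (if cget chars' n = '@'
              then (mdec m n, if mget (mdec m n) n < 4 then q0 ++ [n] else q0)
              else (m, q0))
            = (mdec m n, if mget (mdec m n) n < 4 then q0 ++ [n] else q0)
          rw [if_pos hlv]
        have hproc : procD h w chars' p (d :: ds) = n :: procD h w chars' p ds := by
          rw [procD, procD, List.filterMap_cons, hs, List.filter_cons,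
            if_pos (by simpa using hlv)]
        rw [hstep, ih hnd' (mdec m n) (mdec_shape hm n) _]
        have hdecall : decAll (mdec m n) (procD h w chars' p ds)
            = decAll m (procD h w chars' p (d :: ds)) := by
          rw [hproc]; rfl
        have hself : mget (mdec m n) n = mget m n - 1 := mget_mdec_self hm hnb
        have hfcong : (procD h w chars' p ds).filter (fun x => decide (mget (mdec m n) x - 1 < 4))
            = (procD h w chars' p ds).filter (fun x => decide (mget m x - 1 < 4)) := by
          apply List.filter_congr
          intro x hx
          have hxne : x ≠ n := by
            intro hxx
            exact hn_notin (hxx ▸ List.mem_of_mem_filter hx)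
          rw [mget_mdec_ne hxne]
        rw [hdecall, hfcong, hproc, List.filter_cons, hself]
        by_cases hlt : mget m n - 1 < 4
        · rw [if_pos hlt, if_pos (by simpa using hlt)]
          simp
        · rw [if_neg hlt, if_neg (by simpa using hlt)]
      · have hstep : stepDirs h w chars' p (m, q0) d = (m, q0) := by
          rw [stepDirs, hs]
          show (if cget chars' n = '@'
              then (mdec m n, if mget (mdec m n) n < 4 then q0 ++ [n] else q0)
              else (m, q0))
            = (m, q0)
          rw [if_neg hlv]
        have hproc : procD h w chars' p (d :: ds) = procD h w chars' p ds := by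
          rw [procD, procD, List.filterMap_cons, hs, List.filter_cons,
            if_neg (by simpa using hlv)]
        rw [hstep, hproc]
        exact ih hnd' m hm q0

theorem mem_liveSet_cget {h w : ℕ} {chars : List (List Char)} {p : ℕ × ℕ}
    (hp : p ∈ liveSet h w chars) : cget chars p = '@' :=
  (Finset.mem_filter.mp hp).2

theorem mem_liveSet_box {h w : ℕ} {chars : List (List Char)} {p : ℕ × ℕ}
    (hp : p ∈ liveSet h w chars) : p ∈ pvBox h w :=
  (Finset.mem_filter.mp hp).1

theorem loopA_eq (h w : ℕ) (S0 : Finset (ℕ × ℕ)) (chars : List (List Char))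
    (counts : List (List Int)) (queue : List (ℕ × ℕ)) (removed : Int) :
    Mshape counts h w →
    liveSet h w chars ⊆ S0 →
    core h w S0 ⊆ liveSet h w chars →
    (∀ p ∈ liveSet h w chars, mget counts p = (deg h w (liveSet h w chars) p : Int)) →
    (∀ p ∈ queue, p ∈ pvBox h w) →
    (∀ p ∈ liveSet h w chars, deg h w (liveSet h w chars) p < 4 → p ∈ queue) →
    loopA h w chars counts queue removed
      = removed + ((liveSet h w chars).card : Int) - ((core h w S0).card : Int) := by
  induction chars, counts, queue, removed using loopA.induct h w with
  | case1 chars counts removed =>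
    intro hm hS0 hC hcnt hqbox hq
    have hcl : ∀ p ∈ liveSet h w chars, 4 ≤ deg h w (liveSet h w chars) p := by
      intro p hp
      by_contra hlt
      exact absurd (hq p hp (by omega)) (List.not_mem_nil)
    rw [loopA, terminal_eq_core hS0 hC hcl]
    omega
  | case2 chars counts removed p rest hguard ih =>
    intro hm hS0 hC hcnt hqbox hq
    rw [loopA, if_pos hguard]
    apply ih hm hS0 hC hcnt (fun q hqm => hqbox q (List.mem_cons_of_mem _ hqm))
    intro q hqS hdq
    rcases List.mem_cons.mp (hq q hqS hdq) with rfl | hmem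
    · exact absurd (mem_liveSet_cget hqS) hguard
    · exact hmem
  | case3 chars counts removed p rest hguard hge ih =>
    intro hm hS0 hC hcnt hqbox hq
    rw [loopA, if_neg hguard, if_pos hge]
    have hat : cget chars p = '@' := not_not.mp hguard
    have hpS : p ∈ liveSet h w chars :=
      Finset.mem_filter.mpr ⟨hqbox p List.mem_cons_self, hat⟩
    have hdp : 4 ≤ deg h w (liveSet h w chars) p := by
      have := hcnt p hpS
      omega
    apply ih hm hS0 hC hcnt (fun q hqm => hqbox q (List.mem_cons_of_mem _ hqm))
    intro q hqS hdq
    rcases List.mem_cons.mp (hq q hqS hdq) with rfl | hmem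
    · omega
    · exact hmem
  | case4 chars counts removed p rest hguard hge chars' st ih =>
    intro hm hS0 hC hcnt hqbox hq
    have hch : chars' = cset chars p '.' := rfl
    have hst : st = pvDirs.foldl (stepDirs h w chars' p) (counts, rest) := rfl
    rw [hch] at hst
    have hat : cget chars p = '@' := not_not.mp hguard
    have hpbox : p ∈ pvBox h w := hqbox p List.mem_cons_self
    have hpS : p ∈ liveSet h w chars := Finset.mem_filter.mpr ⟨hpbox, hat⟩
    have hdegp : deg h w (liveSet h w chars) p < 4 := by
      have := hcnt p hpS
      omega
    have hS' : liveSet h w (cset chars p '.') = (liveSet h w chars).erase p :=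
      liveSet_cset hat
    have hfold := foldDirs_eq h w (cset chars p '.') p pvDirs (nodup_nbrList h w p)
      counts hm rest
    have hPbox : ∀ n ∈ procD h w (cset chars p '.') p pvDirs, n ∈ pvBox h w :=
      fun n hn => mem_nbrList_box (mem_procD.mp hn).1
    have hPS : ∀ n, n ∈ procD h w (cset chars p '.') p pvDirs
        ↔ n ∈ nbrList h w p ∧ n ∈ (liveSet h w chars).erase p := by
      intro n
      rw [mem_procD]
      constructor
      · rintro ⟨hnb, hcg⟩
        refine ⟨hnb, ?_⟩
        rw [← hS']
        exact Finset.mem_filter.mpr ⟨mem_nbrList_box hnb, hcg⟩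
      · rintro ⟨hnb, hme⟩
        refine ⟨hnb, ?_⟩
        rw [← hS'] at hme
        exact mem_liveSet_cget hme
    have hmg := mget_decAll (procD h w (cset chars p '.') p pvDirs) counts hm
      (nodup_procD h w _ p) hPbox
    rw [hch, hst, hfold] at ih
    -- the six invariants for the recursive call
    have inv1 : Mshape (decAll counts (procD h w (cset chars p '.') p pvDirs)) h w :=
      decAll_shape _ counts hm
    have inv2 : liveSet h w (cset chars p '.') ⊆ S0 := by
      rw [hS']
      exact Finset.Subset.trans (Finset.erase_subset _ _) hS0
    have inv3 : core h w S0 ⊆ liveSet h w (cset chars p '.') := by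
      rw [hS']
      exact Finset.subset_erase.mpr ⟨hC, not_core_of_removable hC hdegp⟩
    have inv4 : ∀ q ∈ liveSet h w (cset chars p '.'),
        mget (decAll counts (procD h w (cset chars p '.') p pvDirs)) q
          = (deg h w (liveSet h w (cset chars p '.')) q : Int) := by
      intro q hqS'
      rw [hS'] at hqS' ⊢
      have hqS : q ∈ liveSet h w chars := Finset.mem_of_mem_erase hqS'
      have hqbox' : q ∈ pvBox h w := mem_liveSet_box hqS
      rw [hmg q]
      by_cases hqn : q ∈ nbrList h w p
      · have hqP : q ∈ procD h w (cset chars p '.') p pvDirs := (hPS q).mpr ⟨hqn, hqS'⟩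
        have hpn : p ∈ nbrList h w q := nbr_symm hqn hpbox
        have := deg_erase_of_mem hpn hpS
        have hcq := hcnt q hqS
        rw [if_pos hqP]
        omega
      · have hqP : q ∉ procD h w (cset chars p '.') p pvDirs :=
          fun hc => hqn ((hPS q).mp hc).1
        have hpn : ¬(p ∈ nbrList h w q ∧ p ∈ liveSet h w chars) := by
          rintro ⟨hc, _⟩
          exact hqn (nbr_symm hc hqbox')
        have := deg_erase_of_not hpn
        have hcq := hcnt q hqS
        rw [if_neg hqP]
        omega
    have inv5 : ∀ q ∈ rest ++ (procD h w (cset chars p '.') p pvDirs).filter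
        (fun n => decide (mget counts n - 1 < 4)), q ∈ pvBox h w := by
      intro q hqm
      rcases List.mem_append.mp hqm with hql | hqr
      · exact hqbox q (List.mem_cons_of_mem _ hql)
      · exact hPbox q (List.mem_of_mem_filter hqr)
    have inv6 : ∀ q ∈ liveSet h w (cset chars p '.'),
        deg h w (liveSet h w (cset chars p '.')) q < 4 →
        q ∈ rest ++ (procD h w (cset chars p '.') p pvDirs).filter
          (fun n => decide (mget counts n - 1 < 4)) := by
      intro q hqS' hdq'
      rw [hS'] at hqS' hdq'
      have hqS : q ∈ liveSet h w chars := Finset.mem_of_mem_erase hqS'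
      have hqbox' : q ∈ pvBox h w := mem_liveSet_box hqS
      by_cases hqn : q ∈ nbrList h w p
      · have hqP : q ∈ procD h w (cset chars p '.') p pvDirs := (hPS q).mpr ⟨hqn, hqS'⟩
        apply List.mem_append.mpr
        right
        apply List.mem_filter.mpr
        refine ⟨hqP, ?_⟩
        have hpn : p ∈ nbrList h w q := nbr_symm hqn hpbox
        have := deg_erase_of_mem hpn hpS
        have hcq := hcnt q hqS
        simp only [decide_eq_true_eq]
        omega
      · have hpn : ¬(p ∈ nbrList h w q ∧ p ∈ liveSet h w chars) := by
          rintro ⟨hc, _⟩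
          exact hqn (nbr_symm hc hqbox')
        have hde := deg_erase_of_not hpn
        have hdq : deg h w (liveSet h w chars) q < 4 := by omega
        rcases List.mem_cons.mp (hq q hqS hdq) with rfl | hmem
        · exact absurd (Finset.mem_erase.mp hqS').1 (by simp)
        · exact List.mem_append.mpr (Or.inl hmem)
    rw [loopA, if_neg hguard, if_neg hge]
    show loopA h w (cset chars p '.')
        (pvDirs.foldl (stepDirs h w (cset chars p '.') p) (counts, rest)).1
        (pvDirs.foldl (stepDirs h w (cset chars p '.') p) (counts, rest)).2
        (removed + 1)
      = removed + ((liveSet h w chars).card : Int) - ((core h w S0).card : Int)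
    rw [hfold, ih inv1 inv2 inv3 inv4 inv5 inv6]
    have hcard : ((liveSet h w chars).erase p).card = (liveSet h w chars).card - 1 :=
      Finset.card_erase_of_mem hpS
    have hpos : 0 < (liveSet h w chars).card := Finset.card_pos.mpr ⟨p, hpS⟩
    rw [hS', hcard]
    omega


theorem mem_sweepB (h w : ℕ) (chars : List (List Char)) (p : ℕ × ℕ) :
    p ∈ sweepB h w chars
      ↔ p ∈ liveSet h w chars ∧ deg h w (liveSet h w chars) p < 4 := by
  rw [sweepB]
  simp only [List.mem_flatMap, List.mem_map, List.mem_filter, List.mem_range,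
    Bool.and_eq_true, beq_iff_eq, decide_eq_true_eq]
  constructor
  · rintro ⟨r, hr, c, ⟨hc, hat, hcnt⟩, rfl⟩
    exact ⟨Finset.mem_filter.mpr ⟨(mem_box_iff h w (r, c)).mpr ⟨hr, hc⟩, hat⟩,
      by rwa [← countNbrs_eq_deg]⟩
  · rintro ⟨hp, hd⟩
    obtain ⟨hb, hat⟩ := Finset.mem_filter.mp hp
    rw [mem_box_iff] at hb
    exact ⟨p.1, hb.1, p.2, ⟨hb.2, hat, by rwa [countNbrs_eq_deg]⟩, rfl⟩

theorem nodup_sweepB (h w : ℕ) (chars : List (List Char)) : (sweepB h w chars).Nodup := by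
  rw [sweepB, List.nodup_flatMap]
  constructor
  · intro r _
    apply List.Nodup.map
    · intro a b hab
      exact congrArg Prod.snd hab
    · exact (List.nodup_range).filter _
  · apply List.Pairwise.imp ?_ (List.pairwise_lt_range)
    intro a b hab
    intro x hxa hxb
    simp only [List.mem_map, List.mem_filter] at hxa hxb
    obtain ⟨c1, _, rfl⟩ := hxa
    obtain ⟨c2, _, he⟩ := hxb
    have : b = a := congrArg Prod.fst he
    omega

theorem loopB_eq (h w : ℕ) (S0 : Finset (ℕ × ℕ)) (chars : List (List Char)) (removed : Int) :
    liveSet h w chars ⊆ S0 →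
    core h w S0 ⊆ liveSet h w chars →
    loopB h w chars removed
      = removed + ((liveSet h w chars).card : Int) - ((core h w S0).card : Int) := by
  induction chars, removed using loopB.induct h w with
  | case1 chars removed batch hb =>
    intro hS0 hC
    have hbatch : batch = sweepB h w chars := rfl
    rw [hbatch] at hb
    rw [loopB]
    rw [dif_pos hb]
    have hcl : ∀ p ∈ liveSet h w chars, 4 ≤ deg h w (liveSet h w chars) p := by
      intro p hp
      by_contra hlt
      have : p ∈ sweepB h w chars := (mem_sweepB h w chars p).mpr ⟨hp, by omega⟩
      rw [hb] at this
      exact absurd this (List.not_mem_nil)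
    rw [terminal_eq_core hS0 hC hcl]
    omega
  | case2 chars removed batch hb ih =>
    intro hS0 hC
    have hbatch : batch = sweepB h w chars := rfl
    rw [hbatch] at hb ih
    rw [loopB]
    rw [dif_neg hb]
    have hBmem : ∀ p ∈ sweepB h w chars, p ∈ liveSet h w chars :=
      fun p hp => ((mem_sweepB h w chars p).mp hp).1
    have hS' : liveSet h w (blank chars (sweepB h w chars))
        = liveSet h w chars \ (sweepB h w chars).toFinset :=
      liveSet_blank (sweepB h w chars) chars (nodup_sweepB h w chars) hBmem
    have hBsub : (sweepB h w chars).toFinset ⊆ liveSet h w chars := by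
      intro p hp
      exact hBmem p (List.mem_toFinset.mp hp)
    have hcardB : (sweepB h w chars).toFinset.card = (sweepB h w chars).length :=
      List.toFinset_card_of_nodup (nodup_sweepB h w chars)
    have inv2 : liveSet h w (blank chars (sweepB h w chars)) ⊆ S0 := by
      rw [hS']
      exact Finset.Subset.trans (Finset.sdiff_subset) hS0
    have inv3 : core h w S0 ⊆ liveSet h w (blank chars (sweepB h w chars)) := by
      rw [hS']
      apply Finset.subset_sdiff.mpr
      refine ⟨hC, ?_⟩
      apply Finset.disjoint_left.mpr
      intro q hqC hqB
      have := ((mem_sweepB h w chars q).mp (List.mem_toFinset.mp hqB)).2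
      exact absurd hqC (not_core_of_removable hC this)
    rw [ih inv2 inv3]
    have hcard := Finset.card_sdiff_add_card_eq_card hBsub
    rw [hcardB] at hcard
    rw [hS']
    omega

theorem part2_eq (grid : List String) (hne : grid ≠ []) :
    part2 grid
      = ((liveSet grid.length (grid.headD "").length (grid.map String.toList)).card : Int)
        - ((core grid.length (grid.headD "").length
            (liveSet grid.length (grid.headD "").length (grid.map String.toList))).card : Int) := by
  rw [part2, if_neg hne]
  have hmget : ∀ r c : ℕ, r < grid.length → c < (grid.headD "").length →
      mget ((List.range grid.length).map (fun r => (List.range (grid.headD "").length).map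
        (fun c => if cget (grid.map String.toList) (r, c) = '@'
          then (countNbrs grid.length (grid.headD "").length (grid.map String.toList) (r, c) : Int)
          else 0))) (r, c)
      = (if cget (grid.map String.toList) (r, c) = '@'
          then (countNbrs grid.length (grid.headD "").length (grid.map String.toList) (r, c) : Int)
          else 0) := by
    intro r c hr hc
    rw [mget]
    simp only [List.headD_eq_head?_getD] at hc
    simp [List.getD_eq_getElem?_getD, List.getElem?_map, List.getElem?_range, hr, hc]
  have hshape : Mshape ((List.range grid.length).map (fun r =>
      (List.range (grid.headD "").length).map
        (fun c => if cget (grid.map String.toList) (r, c) = '@'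
          then (countNbrs grid.length (grid.headD "").length (grid.map String.toList) (r, c) : Int)
          else 0))) grid.length (grid.headD "").length := by
    constructor
    · simp
    · intro row hrow
      rw [List.mem_map] at hrow
      obtain ⟨r, _, rfl⟩ := hrow
      simp
  rw [loopA_eq grid.length (grid.headD "").length
      (liveSet grid.length (grid.headD "").length (grid.map String.toList))
      (grid.map String.toList) _ _ 0 hshape (Finset.Subset.refl _) (core_subset _ _ _) ?_ ?_ ?_]
  · omega
  · intro p hp
    obtain ⟨hb, hat⟩ := Finset.mem_filter.mp hp
    rw [mem_box_iff] at hb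
    have := hmget p.1 p.2 hb.1 hb.2
    rw [(show ((p.1 : ℕ), (p.2 : ℕ)) = p from rfl)] at this
    rw [this, if_pos hat, countNbrs_eq_deg]
  · intro p hp
    rw [List.mem_flatMap] at hp
    obtain ⟨r, hr, hp⟩ := hp
    rw [List.mem_map] at hp
    obtain ⟨c, hc, rfl⟩ := hp
    rw [List.mem_filter] at hc
    rw [mem_box_iff]
    exact ⟨List.mem_range.mp hr, List.mem_range.mp hc.1⟩
  · intro p hp hdp
    obtain ⟨hb, hat⟩ := Finset.mem_filter.mp hp
    rw [mem_box_iff] at hb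
    rw [List.mem_flatMap]
    refine ⟨p.1, List.mem_range.mpr hb.1, ?_⟩
    rw [List.mem_map]
    refine ⟨p.2, ?_, rfl⟩
    rw [List.mem_filter]
    refine ⟨List.mem_range.mpr hb.2, ?_⟩
    have hmg := hmget p.1 p.2 hb.1 hb.2
    rw [(show ((p.1 : ℕ), (p.2 : ℕ)) = p from rfl)] at hmg
    rw [countNbrs_eq_deg] at hmg
    simp only [Bool.and_eq_true, beq_iff_eq, decide_eq_true_eq]
    refine ⟨hat, ?_⟩
    rw [hmg, if_pos hat]
    exact_mod_cast hdp

theorem part2_alt_eq (grid : List String) (hne : grid ≠ []) :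
    part2_alt grid
      = ((liveSet grid.length (grid.headD "").length (grid.map String.toList)).card : Int)
        - ((core grid.length (grid.headD "").length
            (liveSet grid.length (grid.headD "").length (grid.map String.toList))).card : Int) := by
  rw [part2_alt, if_neg hne]
  rw [loopB_eq grid.length (grid.headD "").length
      (liveSet grid.length (grid.headD "").length (grid.map String.toList))
      (grid.map String.toList) 0 (Finset.Subset.refl _) (core_subset _ _ _)]
  omega

-- ===== VERDICT (by name: the statement is the Claim_ definition above) =====
theorem part2_spec : Claim_equal_part2 := by
  intro grid _ _
  unfold Spec_part2
  by_cases hg : grid = []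
  · subst hg
    rfl
  · rw [part2_eq grid hg, part2_alt_eq grid hg]
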